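-- pv_equiv track=rewrite | github.com/alexlm78/AoC | 2024/Day09/solve_day09.py | find_file_segment
-- ===== SOURCE A (Python) =====
-- def find_file_segment(blocks: list[int | None], file_id: int) -> tuple[int, int] | None:
--     n = len(blocks)
--     i = 0
--     while i < n and blocks[i] != file_id:
--         i += 1
--     if i == n:
--         return None
--     start = i
--     while i < n and blocks[i] == file_id:
--         i += 1
--     length = i - start
--     return start, length
-- ===== SOURCE B (Python) =====
-- def _runs(blocks):
--     # yield (value, length) for each maximal run of equal consecutive elements
--     i = 0
--     n = len(blocks)
--     while i < n:
--         j = i + 1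
--         while j < n and blocks[j] == blocks[i]:
--             j += 1
--         yield blocks[i], j - i
--         i = j
--
-- def find_file_segment(blocks, file_id):
--     # Group-by decomposition: walk the contiguous runs, keeping a running offset,
--     # and return (offset, length) for the run whose value is file_id.
--     offset = 0
--     for value, length in _runs(blocks):
--         if value == file_id:
--             return offset, length
--         offset += length
--     return None
-- ===== Notes on version B (the rewrite author's own statement) =====
-- stated objective: alternative
-- what changed: B traverses the list as contiguous runs (group-by style): it measures each run once and either returns (offset, run length) when the run's value is file_id or skips the whole run, instead of A's two separate index scans (find the first match, then measure it).
import Mathlib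
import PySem

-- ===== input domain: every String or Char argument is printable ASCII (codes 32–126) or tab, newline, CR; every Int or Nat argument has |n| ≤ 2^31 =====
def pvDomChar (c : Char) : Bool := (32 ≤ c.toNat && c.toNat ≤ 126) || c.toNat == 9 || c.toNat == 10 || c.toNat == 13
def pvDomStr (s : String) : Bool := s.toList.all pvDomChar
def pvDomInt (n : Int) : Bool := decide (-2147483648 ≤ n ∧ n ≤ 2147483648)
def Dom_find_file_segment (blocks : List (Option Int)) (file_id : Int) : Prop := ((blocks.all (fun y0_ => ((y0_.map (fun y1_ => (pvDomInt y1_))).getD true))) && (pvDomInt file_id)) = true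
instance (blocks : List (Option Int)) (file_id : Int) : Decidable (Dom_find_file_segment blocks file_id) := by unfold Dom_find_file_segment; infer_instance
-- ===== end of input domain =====

-- B re-implements A as a single pass over contiguous runs (group-by style) instead of
-- A's two separate index scans; same return value everywhere, no speed claim.

-- ===== PORT A =====
-- first while loop: advance i while i < n and blocks[i] != file_id
def ffsFind (blocks : List (Option Int)) (file_id : Int) (i : Nat) : Nat :=
  if i < blocks.length then
    if blocks.getD i none ≠ some file_id then ffsFind blocks file_id (i + 1) else i
  else i
termination_by blocks.length - i

-- second while loop: advance i while i < n and blocks[i] == file_id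
def ffsRun (blocks : List (Option Int)) (file_id : Int) (i : Nat) : Nat :=
  if i < blocks.length then
    if blocks.getD i none = some file_id then ffsRun blocks file_id (i + 1) else i
  else i
termination_by blocks.length - i

def find_file_segment (blocks : List (Option Int)) (file_id : Int) : Option (Int × Int) :=
  let n := blocks.length
  let i := ffsFind blocks file_id 0
  if i = n then none
  else
    let start := i
    let j := ffsRun blocks file_id i
    some ((start : Int), ((j : Int) - (start : Int)))

-- ===== PORT B =====
-- _runs: the list of (value, length) pairs of the maximal runs of equal consecutive elements
def ffsRunsList (xs : List (Option Int)) : List (Option Int × Int) :=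
  match xs with
  | [] => []
  | x :: rest =>
    (x, ((1 + (rest.takeWhile (fun y => y == x)).length : Nat) : Int))
      :: ffsRunsList (rest.dropWhile (fun y => y == x))
termination_by xs.length
decreasing_by
  simp only [List.length_cons]
  exact Nat.lt_succ_of_le (List.length_dropWhile_le _ _)

-- the for loop of B: scan the runs keeping a running offset
def ffsScan (rs : List (Option Int × Int)) (file_id : Int) (offset : Int) : Option (Int × Int) :=
  match rs with
  | [] => none
  | (value, length) :: rs' =>
    if value = some file_id then some (offset, length)
    else ffsScan rs' file_id (offset + length)

def find_file_segment_alt (blocks : List (Option Int)) (file_id : Int) : Option (Int × Int) :=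
  ffsScan (ffsRunsList blocks) file_id 0

-- ===== PRECONDITION & SPEC =====
def Spec_find_file_segment (blocks : List (Option Int)) (file_id : Int) (out : Option (Int × Int)) : Prop := out = find_file_segment_alt blocks file_id
instance (blocks : List (Option Int)) (file_id : Int) (out : Option (Int × Int)) : Decidable (Spec_find_file_segment blocks file_id out) := by unfold Spec_find_file_segment; infer_instance

-- ===== CLAIM (what is proved, stated in full; the proofs are below) =====
def Claim_equal_find_file_segment : Prop := ∀ (blocks : List (Option Int)) (file_id : Int), Dom_find_file_segment blocks file_id → Spec_find_file_segment blocks file_id (find_file_segment blocks file_id)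

-- ===== LEMMAS AND PROOFS =====

-- proof helper: B's two stages fused into one recursion over runs
def ffsRuns (xs : List (Option Int)) (file_id : Int) (offset : Int) : Option (Int × Int) :=
  match xs with
  | [] => none
  | x :: rest =>
    let run := rest.takeWhile (fun y => y == x)
    let k : Nat := 1 + run.length
    if x = some file_id then some (offset, (k : Int))
    else ffsRuns (rest.dropWhile (fun y => y == x)) file_id (offset + (k : Int))
termination_by xs.length
decreasing_by
  simp only [List.length_cons]
  exact Nat.lt_succ_of_le (List.length_dropWhile_le _ _)

-- B's scan over the run list equals the fused recursion
theorem ffsScan_runsList (file_id : Int) :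
    ∀ (n : Nat) (xs : List (Option Int)), xs.length ≤ n →
      ∀ offset, ffsScan (ffsRunsList xs) file_id offset = ffsRuns xs file_id offset := by
  intro n
  induction n with
  | zero =>
    intro xs hxs offset
    match xs with
    | [] => rw [ffsRunsList]; rw [ffsScan, ffsRuns]
  | succ n ih =>
    intro xs hxs offset
    match xs with
    | [] => rw [ffsRunsList]; rw [ffsScan, ffsRuns]
    | x :: rest =>
      have hlen : (rest.dropWhile (fun y => y == x)).length ≤ n := by
        have := List.length_dropWhile_le (fun y => y == x) rest
        simp only [List.length_cons] at hxs
        omega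
      rw [ffsRunsList, ffsScan, ffsRuns, ih _ hlen]

-- common reference function: structural recursion, one element at a time
def ffsSpec (xs : List (Option Int)) (file_id : Int) (offset : Int) : Option (Int × Int) :=
  match xs with
  | [] => none
  | x :: rest =>
    if x = some file_id then
      some (offset, 1 + ((rest.takeWhile (fun y => y == some file_id)).length : Int))
    else ffsSpec rest file_id (offset + 1)

theorem ffsRun_eq (blocks : List (Option Int)) (file_id : Int) :
    ∀ i, i ≤ blocks.length →
      ffsRun blocks file_id i = i + ((blocks.drop i).takeWhile (fun y => y == some file_id)).length := by
  intro i hi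
  induction hn : blocks.length - i generalizing i with
  | zero =>
    have hei : i = blocks.length := by omega
    rw [ffsRun]
    simp [hei]
  | succ k ih =>
    have hlt : i < blocks.length := by omega
    have hg : blocks.getD i none = blocks[i] := by
      rw [List.getD_eq_getElem?_getD, List.getElem?_eq_getElem hlt]; rfl
    rw [List.drop_eq_getElem_cons hlt, List.takeWhile_cons, ffsRun]
    by_cases hx : blocks[i] = some file_id
    · simp only [hlt, if_pos, hg, hx, beq_self_eq_true, List.length_cons]
      rw [ih (i + 1) (by omega) (by omega)]
      omega
    · have hb : (blocks[i] == some file_id) = false := by simp [hx]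
      simp [hlt, hx, hb]

theorem ffsFind_eq (blocks : List (Option Int)) (file_id : Int) :
    ∀ i, i ≤ blocks.length →
      (if ffsFind blocks file_id i = blocks.length then none
       else some ((ffsFind blocks file_id i : Int),
         ((ffsRun blocks file_id (ffsFind blocks file_id i) : Int) - (ffsFind blocks file_id i : Int))))
      = ffsSpec (blocks.drop i) file_id (i : Int) := by
  intro i hi
  induction hn : blocks.length - i generalizing i with
  | zero =>
    have hei : i = blocks.length := by omega
    rw [ffsFind]
    simp [hei, ffsSpec]
  | succ k ih =>
    have hlt : i < blocks.length := by omega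
    have hg : blocks.getD i none = blocks[i] := by
      rw [List.getD_eq_getElem?_getD, List.getElem?_eq_getElem hlt]; rfl
    by_cases hx : blocks[i] = some file_id
    · have hf : ffsFind blocks file_id i = i := by
        rw [ffsFind]; simp [hlt, hx]
      have hne : i ≠ blocks.length := by omega
      rw [hf, if_neg hne, List.drop_eq_getElem_cons hlt]
      simp only [ffsSpec, hx]
      rw [ffsRun_eq blocks file_id i (le_of_lt hlt), List.drop_eq_getElem_cons hlt,
        List.takeWhile_cons]
      simp only [hx, beq_self_eq_true, if_true]
      rw [List.length_cons]
      simp only [Option.some.injEq, Prod.mk.injEq]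
      refine ⟨trivial, ?_⟩
      push_cast
      ring
    · have hf : ffsFind blocks file_id i = ffsFind blocks file_id (i + 1) := by
        rw [ffsFind]; simp [hlt, hx]
      have hstep : ffsSpec (blocks.drop i) file_id (i : Int)
          = ffsSpec (blocks.drop (i + 1)) file_id ((i : Int) + 1) := by
        rw [List.drop_eq_getElem_cons hlt]
        simp [ffsSpec, hx]
      rw [hf, hstep, ih (i + 1) (by omega) (by omega)]
      push_cast
      ring_nf

-- skipping a run of elements all ≠ file_id steps ffsSpec forward by the run's length
theorem ffsSpec_skip (run : List (Option Int)) (rest : List (Option Int)) (file_id : Int) :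
    ∀ offset : Int, (∀ y ∈ run, y ≠ some file_id) →
    ffsSpec (run ++ rest) file_id offset = ffsSpec rest file_id (offset + run.length) := by
  induction run with
  | nil => intro offset _; simp
  | cons a t ih =>
    intro offset h
    have ha : a ≠ some file_id := h a (by simp)
    simp only [List.cons_append, ffsSpec, if_neg ha]
    rw [ih (offset + 1) (fun y hy => h y (List.mem_cons_of_mem _ hy))]
    simp only [List.length_cons]
    congr 1
    push_cast
    ring

theorem ffsRuns_eq (file_id : Int) :
    ∀ (n : Nat) (xs : List (Option Int)), xs.length ≤ n →
      ∀ offset, ffsRuns xs file_id offset = ffsSpec xs file_id offset := by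
  intro n
  induction n with
  | zero =>
    intro xs hxs offset
    match xs with
    | [] => rw [ffsRuns]; rfl
  | succ n ih =>
    intro xs hxs offset
    match xs with
    | [] => rw [ffsRuns]; rfl
    | x :: rest =>
      rw [ffsRuns]
      by_cases hx : x = some file_id
      · subst hx
        rw [if_pos rfl,
          show ffsSpec (some file_id :: rest) file_id offset
            = some (offset, 1 + ((rest.takeWhile (fun y => y == some file_id)).length : Int)) from by
              rw [ffsSpec, if_pos rfl]]
        simp only [Option.some.injEq, Prod.mk.injEq, true_and]
        push_cast
        ring
      · have hlen : (rest.dropWhile (fun y => y == x)).length ≤ n := by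
          have := List.length_dropWhile_le (fun y => y == x) rest
          simp only [List.length_cons] at hxs
          omega
        have hmem : ∀ y ∈ rest.takeWhile (fun y => y == x), y ≠ some file_id := by
          intro y hy
          have hb := List.mem_takeWhile_imp hy
          simp only [beq_iff_eq] at hb
          rw [hb]; exact hx
        have hsplit : rest = rest.takeWhile (fun y => y == x) ++ rest.dropWhile (fun y => y == x) :=
          (List.takeWhile_append_dropWhile).symm
        rw [if_neg hx, ih _ hlen,
          show ffsSpec (x :: rest) file_id offset = ffsSpec rest file_id (offset + 1) from by
            rw [ffsSpec, if_neg hx]]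
        conv_rhs => rw [hsplit]
        rw [ffsSpec_skip _ _ _ _ hmem]
        congr 1
        push_cast
        ring

-- ===== VERDICT (by name: the statement is the Claim_ definition above) =====
theorem find_file_segment_spec : Claim_equal_find_file_segment := by
  intro blocks file_id _
  unfold Spec_find_file_segment find_file_segment find_file_segment_alt
  rw [ffsScan_runsList file_id blocks.length blocks le_rfl 0,
    ffsRuns_eq file_id blocks.length blocks le_rfl 0]
  have h := ffsFind_eq blocks file_id 0 (Nat.zero_le _)
  simpa using h
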